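-- pv_equiv track=rewrite | github.com/max1vol/education-craft | scripts/build_site_construction_data.py | fallback_materials_from_methods
-- ===== SOURCE A (Python) =====
-- def fallback_materials_from_methods(methods: list[tuple[str, str]]) -> list[str]:
--     inferred: list[str] = []
--     for key, _label in methods:
--         if key in {"rock_cut", "ashlar", "dry_stone"}:
--             inferred.append("Stone")
--         if key in {"mudbrick"}:
--             inferred.extend(["Mudbrick", "Clay"])
--         if key in {"fired_brick", "terracotta"}:
--             inferred.extend(["Fired brick", "Clay"])
--         if key in {"earthworks"}:
--             inferred.append("Earth")
--         if key in {"timber"}: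
--             inferred.append("Timber")
--         if key in {"concrete"}:
--             inferred.extend(["Stone", "Lime mortar"])
--     deduped: list[str] = []
--     seen: set[str] = set()
--     for item in inferred:
--         norm = item.lower()
--         if norm in seen:
--             continue
--         seen.add(norm)
--         deduped.append(item)
--     return deduped
-- ===== SOURCE B (Python) =====
-- MATERIALS = {
--     "rock_cut": ["Stone"],
--     "ashlar": ["Stone"],
--     "dry_stone": ["Stone"],
--     "mudbrick": ["Mudbrick", "Clay"],
--     "fired_brick": ["Fired brick", "Clay"],
--     "terracotta": ["Fired brick", "Clay"],
--     "earthworks": ["Earth"],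
--     "timber": ["Timber"],
--     "concrete": ["Stone", "Lime mortar"],
-- }
--
-- CANDIDATES = ["Stone", "Mudbrick", "Clay", "Fired brick", "Earth", "Timber", "Lime mortar"]
--
--
-- def fallback_materials_from_methods(methods: list[tuple[str, str]]) -> list[str]:
--     # Candidate-centric: flatten the material stream, keep the candidates that
--     # occur in it, and sort them by the position of their first occurrence.
--     stream = [m for key, _label in methods for m in MATERIALS.get(key, [])]
--     present = [m for m in CANDIDATES if m in stream]
--     return sorted(present, key=stream.index)
-- ===== Notes on version B (the rewrite author's own statement) =====
-- stated objective: alternative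
-- what changed: Replaces the per-method if-chain plus a separate seen-set dedup pass with a candidate-centric pipeline: flatten the material stream from a key->materials table, filter the fixed candidate list to those occurring, and sort them by index of first occurrence in the stream.
import Mathlib
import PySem

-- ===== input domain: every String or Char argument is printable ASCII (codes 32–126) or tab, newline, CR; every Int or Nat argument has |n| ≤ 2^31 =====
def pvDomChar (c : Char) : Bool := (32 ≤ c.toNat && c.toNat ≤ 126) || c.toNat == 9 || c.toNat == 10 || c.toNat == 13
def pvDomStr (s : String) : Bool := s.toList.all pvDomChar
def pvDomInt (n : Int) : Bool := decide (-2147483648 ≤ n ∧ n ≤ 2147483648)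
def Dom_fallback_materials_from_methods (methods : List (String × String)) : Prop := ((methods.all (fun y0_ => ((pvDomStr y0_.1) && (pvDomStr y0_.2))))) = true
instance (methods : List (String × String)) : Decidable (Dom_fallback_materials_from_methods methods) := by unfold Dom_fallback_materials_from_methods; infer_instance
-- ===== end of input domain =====

-- B is candidate-centric instead of stream-centric: it flattens the per-key material
-- stream from a table, filters the fixed candidate materials that occur in it, and
-- sorts them by position of first occurrence — no seen-set and no dedup pass (objective: alternative).

-- ===== PORT A =====
def fallback_materials_from_methods (methods : List (String × String)) : List String :=
  let inferred := methods.foldl (fun inferred kv =>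
    let key := kv.1
    let inferred := if key ∈ ["rock_cut", "ashlar", "dry_stone"] then inferred ++ ["Stone"] else inferred
    let inferred := if key ∈ ["mudbrick"] then inferred ++ ["Mudbrick", "Clay"] else inferred
    let inferred := if key ∈ ["fired_brick", "terracotta"] then inferred ++ ["Fired brick", "Clay"] else inferred
    let inferred := if key ∈ ["earthworks"] then inferred ++ ["Earth"] else inferred
    let inferred := if key ∈ ["timber"] then inferred ++ ["Timber"] else inferred
    let inferred := if key ∈ ["concrete"] then inferred ++ ["Stone", "Lime mortar"] else inferred
    inferred) []
  (inferred.foldl (fun (st : List String × PySem.Set String) item =>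
      let norm := PySem.Str.lower item
      if st.2.contains norm then st
      else (st.1 ++ [item], st.2.add norm)) ([], PySem.Set.empty)).1

-- ===== PORT B =====
def pvMaterials : PySem.Dict String (List String) :=
  PySem.Dict.ofList
    [("rock_cut", ["Stone"]), ("ashlar", ["Stone"]), ("dry_stone", ["Stone"]),
     ("mudbrick", ["Mudbrick", "Clay"]),
     ("fired_brick", ["Fired brick", "Clay"]), ("terracotta", ["Fired brick", "Clay"]),
     ("earthworks", ["Earth"]), ("timber", ["Timber"]),
     ("concrete", ["Stone", "Lime mortar"])]

def pvCandidates : List String :=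
  ["Stone", "Mudbrick", "Clay", "Fired brick", "Earth", "Timber", "Lime mortar"]

def fallback_materials_from_methods_alt (methods : List (String × String)) : List String :=
  let stream := methods.flatMap (fun kv => pvMaterials.getD kv.1 [])
  let present := pvCandidates.filter (fun m => stream.contains m)
  -- stream.index(m): exact here — sorted applies the key only to members of present ⊆ stream,
  -- so index? is always some and the .getD 0 default is never used
  PySem.List.sorted present (fun m => (PySem.List.index? stream m).getD 0) false

-- ===== PRECONDITION & SPEC =====
def Spec_fallback_materials_from_methods (methods : List (String × String)) (out : List String) : Prop := out = fallback_materials_from_methods_alt methods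
instance (methods : List (String × String)) (out : List String) : Decidable (Spec_fallback_materials_from_methods methods out) := by unfold Spec_fallback_materials_from_methods; infer_instance

-- ===== CLAIM (what is proved, stated in full; the proofs are below) =====
def Claim_equal_fallback_materials_from_methods : Prop := ∀ (methods : List (String × String)), Dom_fallback_materials_from_methods methods → Spec_fallback_materials_from_methods methods (fallback_materials_from_methods methods)

-- ===== LEMMAS AND PROOFS =====

-- the materials A's if-chain appends for one key
def pvChunk (key : String) : List String :=
  (if key ∈ ["rock_cut", "ashlar", "dry_stone"] then ["Stone"] else []) ++
  (if key ∈ ["mudbrick"] then ["Mudbrick", "Clay"] else []) ++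
  (if key ∈ ["fired_brick", "terracotta"] then ["Fired brick", "Clay"] else []) ++
  (if key ∈ ["earthworks"] then ["Earth"] else []) ++
  (if key ∈ ["timber"] then ["Timber"] else []) ++
  (if key ∈ ["concrete"] then ["Stone", "Lime mortar"] else [])

lemma pvMaterials_items : pvMaterials.items =
    [("rock_cut", ["Stone"]), ("ashlar", ["Stone"]), ("dry_stone", ["Stone"]),
     ("mudbrick", ["Mudbrick", "Clay"]),
     ("fired_brick", ["Fired brick", "Clay"]), ("terracotta", ["Fired brick", "Clay"]),
     ("earthworks", ["Earth"]), ("timber", ["Timber"]),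
     ("concrete", ["Stone", "Lime mortar"])] := by decide

lemma pvChunk_eq_table (key : String) : pvChunk key = pvMaterials.getD key [] := by
  rcases eq_or_ne key "rock_cut" with h | h1
  · subst h; decide
  rcases eq_or_ne key "ashlar" with h | h2
  · subst h; decide
  rcases eq_or_ne key "dry_stone" with h | h3
  · subst h; decide
  rcases eq_or_ne key "mudbrick" with h | h4
  · subst h; decide
  rcases eq_or_ne key "fired_brick" with h | h5
  · subst h; decide
  rcases eq_or_ne key "terracotta" with h | h6
  · subst h; decide
  rcases eq_or_ne key "earthworks" with h | h7
  · subst h; decide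
  rcases eq_or_ne key "timber" with h | h8
  · subst h; decide
  rcases eq_or_ne key "concrete" with h | h9
  · subst h; decide
  have hl : pvChunk key = [] := by
    simp [pvChunk, h1, h2, h3, h4, h5, h6, h7, h8, h9]
  have hr : pvMaterials.getD key [] = [] := by
    simp only [PySem.Dict.getD, PySem.Dict.get?, pvMaterials_items]
    simp [List.find?, beq_eq_false_iff_ne.mpr (Ne.symm h1), beq_eq_false_iff_ne.mpr (Ne.symm h2),
      beq_eq_false_iff_ne.mpr (Ne.symm h3), beq_eq_false_iff_ne.mpr (Ne.symm h4),
      beq_eq_false_iff_ne.mpr (Ne.symm h5), beq_eq_false_iff_ne.mpr (Ne.symm h6),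
      beq_eq_false_iff_ne.mpr (Ne.symm h7), beq_eq_false_iff_ne.mpr (Ne.symm h8),
      beq_eq_false_iff_ne.mpr (Ne.symm h9)]
  rw [hl, hr]

lemma pvInferred_eq (methods : List (String × String)) :
    methods.foldl (fun inferred kv =>
      let key := kv.1
      let inferred := if key ∈ ["rock_cut", "ashlar", "dry_stone"] then inferred ++ ["Stone"] else inferred
      let inferred := if key ∈ ["mudbrick"] then inferred ++ ["Mudbrick", "Clay"] else inferred
      let inferred := if key ∈ ["fired_brick", "terracotta"] then inferred ++ ["Fired brick", "Clay"] else inferred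
      let inferred := if key ∈ ["earthworks"] then inferred ++ ["Earth"] else inferred
      let inferred := if key ∈ ["timber"] then inferred ++ ["Timber"] else inferred
      let inferred := if key ∈ ["concrete"] then inferred ++ ["Stone", "Lime mortar"] else inferred
      inferred) [] = methods.flatMap (fun kv => pvChunk kv.1) := by
  have hstep : ∀ (acc : List String) (kv : String × String),
      (let key := kv.1
       let i1 := if key ∈ ["rock_cut", "ashlar", "dry_stone"] then acc ++ ["Stone"] else acc
       let i2 := if key ∈ ["mudbrick"] then i1 ++ ["Mudbrick", "Clay"] else i1
       let i3 := if key ∈ ["fired_brick", "terracotta"] then i2 ++ ["Fired brick", "Clay"] else i2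
       let i4 := if key ∈ ["earthworks"] then i3 ++ ["Earth"] else i3
       let i5 := if key ∈ ["timber"] then i4 ++ ["Timber"] else i4
       if key ∈ ["concrete"] then i5 ++ ["Stone", "Lime mortar"] else i5)
      = acc ++ pvChunk kv.1 := by
    intro acc kv
    simp only [pvChunk]
    split_ifs <;> simp
  calc methods.foldl _ [] = methods.foldl (fun acc kv => acc ++ pvChunk kv.1) [] :=
        PySem.List.foldl_congr_mem methods _ _ [] (fun acc kv _ => hstep acc kv)
    _ = methods.flatMap (fun kv => pvChunk kv.1) := by
        simpa using PySem.List.foldl_append_eq_flatMap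
          (fun kv : String × String => pvChunk kv.1) methods []

-- every material the table can produce is one of the seven candidates
lemma chunk_subset (key : String) : ∀ m ∈ pvMaterials.getD key [], m ∈ pvCandidates := by
  intro m hm
  rw [← pvChunk_eq_table] at hm
  simp only [pvChunk] at hm
  simp only [List.mem_append] at hm
  rcases hm with ((((h|h)|h)|h)|h)|h <;> split_ifs at h <;>
    simp only [List.mem_cons, List.not_mem_nil, or_false] at h <;>
    simp only [pvCandidates, List.mem_cons, List.not_mem_nil] <;> tauto

-- lower is injective on the seven candidate strings
lemma lower_inj : ∀ a ∈ pvCandidates, ∀ b ∈ pvCandidates,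
    PySem.Str.lower a = PySem.Str.lower b → a = b := by decide

-- A's dedup loop, run over a stream of candidate materials, is set(first occurrences)
lemma loop_inv : ∀ (l out : List String), (∀ x ∈ l, x ∈ pvCandidates) →
    (∀ x ∈ out, x ∈ pvCandidates) →
    (l.foldl (fun (st : List String × PySem.Set String) item =>
        let norm := PySem.Str.lower item
        if st.2.contains norm then st
        else (st.1 ++ [item], st.2.add norm)) (out, out.map PySem.Str.lower)).1
      = l.foldl PySem.Set.add out := by
  intro l
  induction l with
  | nil => intro out _ _; rfl
  | cons i l ih =>
    intro out hl hout
    have hi : i ∈ pvCandidates := hl i (by simp)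
    have hcontains : PySem.Set.contains (out.map PySem.Str.lower) (PySem.Str.lower i)
        = out.contains i := by
      simp only [PySem.Set.contains, List.contains_eq_mem, decide_eq_decide, List.mem_map]
      constructor
      · rintro ⟨y, hy, hyl⟩
        exact (lower_inj y (hout y hy) i hi hyl) ▸ hy
      · intro h; exact ⟨i, h, rfl⟩
    simp only [List.foldl_cons]
    by_cases h : i ∈ out
    · have h1 : PySem.Set.contains (out.map PySem.Str.lower) (PySem.Str.lower i) = true := by
        rw [hcontains]; simpa using h
      have h2 : PySem.Set.add out i = out := by
        simp [PySem.Set.add, PySem.Set.contains, h]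
      rw [h2, if_pos h1]
      exact ih out (fun x hx => hl x (by simp [hx])) hout
    · have h1 : PySem.Set.contains (out.map PySem.Str.lower) (PySem.Str.lower i) = false := by
        rw [hcontains]; simpa using h
      have h2 : PySem.Set.add out i = out ++ [i] := by
        simp [PySem.Set.add, PySem.Set.contains, List.contains_eq_mem, h]
      have h3 : PySem.Set.add (out.map PySem.Str.lower) (PySem.Str.lower i)
          = (out ++ [i]).map PySem.Str.lower := by
        simp only [PySem.Set.add, h1, Bool.false_eq_true, if_false, List.map_append,
          List.map_cons, List.map_nil]
      rw [if_neg (by rw [h1]; simp), h3, h2]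
      exact ih (out ++ [i]) (fun x hx => hl x (by simp [hx]))
        (by intro x hx; rcases List.mem_append.mp hx with hx | hx
            · exact hout x hx
            · simpa using (List.mem_singleton.mp hx) ▸ hi)

-- set(xs) in insertion order is strictly increasing in first-occurrence index
lemma ofList_pairwise_idx (xs : List String) :
    (PySem.Set.ofList xs).Pairwise
      (fun a b => (PySem.List.index? xs a).getD 0 < (PySem.List.index? xs b).getD 0) := by
  induction xs using List.reverseRecOn with
  | nil => simp [PySem.Set.ofList]
  | append_singleton xs x ih =>
    have hofl : PySem.Set.ofList (xs ++ [x]) = PySem.Set.add (PySem.Set.ofList xs) x := by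
      simp [PySem.Set.ofList_eq_foldl, List.foldl_append]
    have hmem : ∀ a, a ∈ PySem.Set.ofList xs → a ∈ xs := by
      intro a ha; exact (PySem.Set.mem_ofList xs a).mp ha
    have hidx : ∀ a ∈ PySem.Set.ofList xs,
        PySem.List.index? (xs ++ [x]) a = PySem.List.index? xs a :=
      fun a ha => PySem.List.index?_append_of_mem [x] (hmem a ha)
    by_cases hx : x ∈ xs
    · have : PySem.Set.add (PySem.Set.ofList xs) x = PySem.Set.ofList xs := by
        simp [PySem.Set.add, List.contains_eq_mem, PySem.Set.mem_ofList, hx]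
      rw [hofl, this]
      exact ih.imp_of_mem (fun {a b} ha hb hab => by rw [hidx a ha, hidx b hb]; exact hab)
    · have : PySem.Set.add (PySem.Set.ofList xs) x = PySem.Set.ofList xs ++ [x] := by
        simp [PySem.Set.add, List.contains_eq_mem, PySem.Set.mem_ofList, hx]
      rw [hofl, this]
      apply List.pairwise_append.mpr
      refine ⟨ih.imp_of_mem (fun {a b} ha hb hab => by rw [hidx a ha, hidx b hb]; exact hab),
        List.pairwise_singleton _ _, ?_⟩
      intro a ha b hb
      rw [List.mem_singleton] at hb
      have hax : a ∈ xs := hmem a ha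
      obtain ⟨k, hk⟩ := Option.isSome_iff_exists.mp ((PySem.List.index?_isSome_iff xs a).mpr hax)
      obtain ⟨hklt, -, -⟩ := PySem.List.getElem_of_index?_eq_some hk
      rw [hb, hidx a ha, hk, PySem.List.index?_append_singleton_self xs x hx]
      simpa using hklt

-- the stream, phrased through the table
lemma stream_subset (methods : List (String × String)) :
    ∀ m ∈ methods.flatMap (fun kv => pvMaterials.getD kv.1 []), m ∈ pvCandidates := by
  intro m hm
  obtain ⟨kv, -, hmk⟩ := List.mem_flatMap.mp hm
  exact chunk_subset kv.1 m hmk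

lemma perm_present (methods : List (String × String)) :
    (PySem.Set.ofList (methods.flatMap (fun kv => pvMaterials.getD kv.1 []))).Perm
      (pvCandidates.filter
        (fun m => (methods.flatMap (fun kv => pvMaterials.getD kv.1 [])).contains m)) := by
  set stream := methods.flatMap (fun kv => pvMaterials.getD kv.1 []) with hs
  have h1 : (PySem.Set.ofList stream).Nodup := PySem.Set.nodup_ofList stream
  have h2 : (pvCandidates.filter (fun m => stream.contains m)).Nodup :=
    List.Nodup.filter _ (by decide)
  rw [List.perm_ext_iff_of_nodup h1 h2]
  intro a
  simp only [PySem.Set.mem_ofList, List.mem_filter, List.contains_eq_mem, decide_eq_true_eq]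
  exact ⟨fun h => ⟨stream_subset methods a h, h⟩, fun h => h.2⟩

-- ===== VERDICT (by name: the statement is the Claim_ definition above) =====
theorem fallback_materials_from_methods_spec : Claim_equal_fallback_materials_from_methods := by
  intro methods _
  show fallback_materials_from_methods methods = fallback_materials_from_methods_alt methods
  unfold fallback_materials_from_methods fallback_materials_from_methods_alt
  simp only [pvInferred_eq, pvChunk_eq_table]
  set stream := methods.flatMap (fun kv => pvMaterials.getD kv.1 []) with hs
  have hA : (stream.foldl (fun (st : List String × PySem.Set String) item =>
      let norm := PySem.Str.lower item
      if st.2.contains norm then st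
      else (st.1 ++ [item], st.2.add norm)) ([], PySem.Set.empty)).1
      = PySem.Set.ofList stream := by
    have := loop_inv stream [] (stream_subset methods) (by simp)
    simpa [PySem.Set.ofList_eq_foldl, PySem.Set.empty] using this
  rw [hA]
  exact (PySem.List.sorted_eq_of_perm_of_pairwise_lt _ _ _ (perm_present methods)
    (ofList_pairwise_idx stream)).symm
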